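-- pv_equiv track=rewrite | github.com/IorenzoLF/Le_Refuge | Le_refuge/refuge/MATH/COLLATZ/meditation_gravite_binaire.py | compter_chutes
-- ===== SOURCE A (Python) =====
-- def compter_chutes(n):
--     """
--     Pour un nombre n, retourne la liste des longueurs de chutes (divisions par 2 consécutives)
--     dans la séquence de Collatz.
--     """
--     chutes = []
--     courant = n
--     while courant != 1:
--         chute = 0
--         while courant % 2 == 0:
--             courant //= 2
--             chute += 1
--         if chute > 0:
--             chutes.append(chute)
--         if courant == 1:
--             break
--         courant = 3 * courant + 1
--     return chutes
-- ===== SOURCE B (Python) =====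
-- def compter_chutes(n):
--     # Build the full Collatz trajectory, then scan consecutive pairs for halving runs.
--     traj = [n]
--     c = n
--     while c != 1:
--         c = c // 2 if c % 2 == 0 else 3 * c + 1
--         traj.append(c)
--     chutes = []
--     run = 0
--     for prev in traj[:-1]:
--         if prev % 2 == 0:
--             run += 1
--         else:
--             if run > 0:
--                 chutes.append(run)
--             run = 0
--     if run > 0:
--         chutes.append(run)
--     return chutes
-- ===== Notes on version B (the rewrite author's own statement) =====
-- stated objective: alternative
-- what changed: A counts halvings inside a nested while-loop as it walks; B first materializes the whole Collatz trajectory as a list and then makes one separate run-length scan over it, counting maximal runs of even values.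
import Mathlib
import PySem

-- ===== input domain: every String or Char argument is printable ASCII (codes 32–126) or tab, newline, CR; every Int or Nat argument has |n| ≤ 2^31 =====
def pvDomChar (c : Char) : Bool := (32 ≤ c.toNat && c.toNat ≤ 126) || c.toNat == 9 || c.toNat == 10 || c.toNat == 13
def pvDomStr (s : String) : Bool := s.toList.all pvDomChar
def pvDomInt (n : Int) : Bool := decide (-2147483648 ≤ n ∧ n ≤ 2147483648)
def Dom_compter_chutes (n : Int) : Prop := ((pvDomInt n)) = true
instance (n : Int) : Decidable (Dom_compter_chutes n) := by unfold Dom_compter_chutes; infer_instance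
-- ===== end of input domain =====

-- B re-decomposes A's nested while-loops as: materialize the Collatz trajectory, then one
-- scan over it counting maximal runs of even values (objective: alternative decomposition).
-- Both outer loops are ported with a fuel counting the 3*c+1 steps (100000 is far beyond any
-- trajectory for |n| ≤ 2^31); fuel and the 'c ≠ 0' guard on halving are totality guards only.

-- ===== PORT A =====
-- inner loop 'while courant % 2 == 0: courant //= 2; chute += 1' ('c ≠ 0' only for totality)
def pvHalveA (c chute : Int) : Int × Int :=
  if PySem.Int.mod c 2 = 0 ∧ c ≠ 0 then pvHalveA (PySem.Int.floordiv c 2) (chute + 1)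
  else (c, chute)
termination_by c.natAbs
decreasing_by
  rename_i h
  obtain ⟨he, hz⟩ := h
  rw [PySem.Int.mod_eq_emod_of_pos (by omega)] at he
  rw [PySem.Int.floordiv_eq_ediv_of_pos (by omega)]
  omega

-- outer loop 'while courant != 1: …' (one fuel per '3*courant+1' step)
def pvLoopA (f : Nat) (c : Int) (acc : List Int) : Option (List Int) :=
  if c ≠ 1 then
    let p := pvHalveA c 0
    let acc' := if p.2 > 0 then acc ++ [p.2] else acc
    if p.1 = 1 then some acc'
    else
      match f with
      | 0 => none
      | f' + 1 => pvLoopA f' (3 * p.1 + 1) acc'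
  else some acc

def compter_chutes (n : Int) : List Int := (pvLoopA 100000 n []).getD []

-- ===== PORT B =====
-- trajectory loop 'while c != 1: c = c//2 if c%2==0 else 3*c+1; traj.append(c)'
def pvTrajB (f : Nat) (c : Int) : Option (List Int) :=
  if c = 1 then some [c]
  else if PySem.Int.mod c 2 = 0 ∧ c ≠ 0 then
    (pvTrajB f (PySem.Int.floordiv c 2)).map (c :: ·)
  else
    match f with
    | 0 => none
    | f' + 1 => (pvTrajB f' (3 * c + 1)).map (c :: ·)
termination_by (f, c.natAbs)
decreasing_by
  all_goals first
    | (apply Prod.Lex.left; omega)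
    | (rename_i _he hz
       have hm : c % 2 = 0 := by
         rw [← PySem.Int.mod_eq_emod_of_pos (by omega : (0:Int) < 2)]; exact hz.1
       have hnz : ¬ c = 0 := hz.2
       apply Prod.Lex.right
       rw [PySem.Int.floordiv_eq_ediv_of_pos (by omega : (0:Int) < 2)]
       omega)

-- 'for prev in traj[:-1]: …' run-length scan over even values, plus the final flush
def pvScanB : List Int → Int → List Int → List Int
  | [], run, acc => if run > 0 then acc ++ [run] else acc
  | p :: rest, run, acc =>
    if PySem.Int.mod p 2 = 0 then pvScanB rest (run + 1) acc
    else pvScanB rest 0 (if run > 0 then acc ++ [run] else acc)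

def compter_chutes_alt (n : Int) : List Int :=
  match pvTrajB 100000 n with
  | none => []
  | some t => pvScanB t.dropLast 0 []

-- ===== PRECONDITION & SPEC =====
-- Pre_ excludes n ≤ 0: there the Python A never returns (infinite loop), so nothing is matched.
def Pre_compter_chutes (n : Int) : Prop := 1 ≤ n
instance (n : Int) : Decidable (Pre_compter_chutes n) := by unfold Pre_compter_chutes; infer_instance
def pvWitness_compter_chutes : Int := (7)

def Spec_compter_chutes (n : Int) (out : List Int) : Prop := out = compter_chutes_alt n
instance (n : Int) (out : List Int) : Decidable (Spec_compter_chutes n out) := by unfold Spec_compter_chutes; infer_instance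

-- ===== CLAIM (what is proved, stated in full; the proofs are below) =====
def Claim_equal_compter_chutes : Prop := ∀ (n : Int), Dom_compter_chutes n → Pre_compter_chutes n → Spec_compter_chutes n (compter_chutes n)

-- ===== LEMMAS AND PROOFS =====

-- the body of pvLoopA's non-trivial branch, as a statement relating the two ports
def pvGoal (f : Nat) (c run : Int) (acc : List Int) : Prop :=
  (if (pvHalveA c run).1 = 1 then
     some (if (pvHalveA c run).2 > 0 then acc ++ [(pvHalveA c run).2] else acc)
   else
     match f with
     | 0 => none
     | f' + 1 =>
       pvLoopA f' (3 * (pvHalveA c run).1 + 1)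
         (if (pvHalveA c run).2 > 0 then acc ++ [(pvHalveA c run).2] else acc))
  = (pvTrajB f c).map (fun t => pvScanB t.dropLast run acc)

theorem pvTrajB_ne_nil {f : Nat} {c : Int} {t : List Int} (h : pvTrajB f c = some t) : t ≠ [] := by
  rw [pvTrajB.eq_def] at h
  split at h
  · simp only [Option.some.injEq] at h; simp [← h]
  · split at h
    · simp only [Option.map_eq_some_iff] at h
      obtain ⟨t', _, ht⟩ := h
      simp [← ht]
    · match f, h with
      | f' + 1, h =>
        simp only [Option.map_eq_some_iff] at h
        obtain ⟨t', _, ht⟩ := h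
        simp [← ht]

theorem pvHalveA_one (run : Int) : pvHalveA 1 run = (1, run) := by
  rw [pvHalveA]
  exact if_neg (by decide)

theorem pv_G (f : Nat) (c run : Int) (acc : List Int) (hc : 1 ≤ c) : pvGoal f c run acc := by
  by_cases h2 : PySem.Int.mod c 2 = 0
  · -- even: one halving on both sides
    have he : c % 2 = 0 := by rwa [PySem.Int.mod_eq_emod_of_pos (by omega)] at h2
    have hc2 : 2 ≤ c := by omega
    have hne1 : ¬ c = 1 := by omega
    have hpos : PySem.Int.mod c 2 = 0 ∧ c ≠ 0 := ⟨h2, by omega⟩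
    have hd : PySem.Int.floordiv c 2 = c / 2 := PySem.Int.floordiv_eq_ediv_of_pos (by omega)
    have hrec := pv_G f (PySem.Int.floordiv c 2) (run + 1) acc (by rw [hd]; omega)
    unfold pvGoal at hrec ⊢
    rw [pvHalveA, if_pos hpos, pvTrajB.eq_def, if_neg hne1, if_pos hpos, Option.map_map, hrec]
    cases htr : pvTrajB f (PySem.Int.floordiv c 2) with
    | none => simp
    | some t =>
      have hne := pvTrajB_ne_nil htr
      simp only [Option.map_some, Function.comp_apply, Option.some.injEq]
      rw [List.dropLast_cons_of_ne_nil hne]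
      simp only [pvScanB]
      rw [if_pos h2]
  · have ho : c % 2 ≠ 0 := by rwa [PySem.Int.mod_eq_emod_of_pos (by omega)] at h2
    have hnotand : ¬ (PySem.Int.mod c 2 = 0 ∧ c ≠ 0) := fun h => h2 h.1
    by_cases hc1 : c = 1
    · subst hc1
      unfold pvGoal
      rw [pvHalveA_one, pvTrajB.eq_def]
      simp [pvScanB]
    · -- odd c ≥ 3: one 3c+1 step on both sides
      have hc3 : 3 ≤ c := by omega
      have hA : pvHalveA c run = (c, run) := by
        rw [pvHalveA]; exact if_neg hnotand
      unfold pvGoal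
      rw [hA, pvTrajB.eq_def, if_neg hc1, if_neg hnotand]
      dsimp only
      rw [if_neg hc1]
      cases f with
      | zero => simp
      | succ f' =>
        have hne31 : (3 : Int) * c + 1 ≠ 1 := by omega
        show pvLoopA f' (3 * c + 1) (if run > 0 then acc ++ [run] else acc) =
          Option.map (fun t => pvScanB t.dropLast run acc)
            (Option.map (fun x => c :: x) (pvTrajB f' (3 * c + 1)))
        rw [pvLoopA.eq_def, if_pos hne31]
        dsimp only
        have hrec := pv_G f' (3 * c + 1) 0 (if run > 0 then acc ++ [run] else acc) (by omega)
        unfold pvGoal at hrec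
        rw [hrec]
        cases htr : pvTrajB f' (3 * c + 1) with
        | none => simp
        | some t =>
          have hne := pvTrajB_ne_nil htr
          simp only [Option.map_some, Option.some.injEq]
          rw [List.dropLast_cons_of_ne_nil hne]
          simp only [pvScanB]
          rw [if_neg h2]
termination_by (f, c.natAbs)
decreasing_by
  all_goals first
    | (apply Prod.Lex.left; omega)
    | (apply Prod.Lex.right
       rw [PySem.Int.floordiv_eq_ediv_of_pos (by omega : (0:Int) < 2)]
       omega)

theorem pvLoopA_eq (f : Nat) (c : Int) (acc : List Int) (hc : 1 ≤ c) :
    pvLoopA f c acc = (pvTrajB f c).map (fun t => pvScanB t.dropLast 0 acc) := by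
  by_cases hc1 : c = 1
  · subst hc1
    rw [pvLoopA.eq_def, pvTrajB.eq_def]
    simp [pvScanB]
  · rw [pvLoopA.eq_def, if_pos hc1]
    dsimp only
    exact pv_G f c 0 acc hc

-- ===== VERDICT (by name: the statement is the Claim_ definition above) =====
theorem compter_chutes_spec : Claim_equal_compter_chutes := by
  intro n _ hpre
  unfold Spec_compter_chutes compter_chutes compter_chutes_alt
  rw [pvLoopA_eq 100000 n [] hpre]
  cases pvTrajB 100000 n <;> simp
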